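-- pv_equiv track=rewrite | github.com/skjonesjr/gRNA | ntgen/generation.py | stem_structures
-- ===== SOURCE A (Python) =====
-- import collections, itertools
--
-- def stem_structures(
--     max_size: int = 16,  # maximum total number nucleotides in the stem
--     min_stem_pairs: int = 2  # min number of paired bases in a row to say that a generated loop forms a self-dimer; such sequences are discarded
-- ) -> set[tuple[str]]:
--     """
--     Generates all possible stem structures up to max_size
--     """
--     # Generate stems with up to max_size // 2 pairs (no loose bases yet!)
--     stem_fragments = ['P' * i for i in range(min_stem_pairs, 2 * min_stem_pairs)]
--
--     all_pairs = set()
--     for n_pairs in range(max_size // 2 // min_stem_pairs + 1):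
--         base_stem = '|' * n_pairs
--         max_unpaired = max_size - len(base_stem) * min_stem_pairs
--
--         out = set([base_stem])
--         stems = set([base_stem])
--
--         # Take stem and add one loose base at all possible locations,
--         # then add another one to the resulting stems at all possible locations, and so on.
--         # Given current stem's size, we can have at most add max_size - size loose pairs
--         while len(stems) > 0:
--             stem = stems.pop()
--             # Insert a single base at all possible locations
--             for i in range(1, len(stem)):
--                 new_stem = stem[:i] + '.' + stem[i:]
--                 if len(new_stem) - len(base_stem) <= max_unpaired:
--                     stems.add(new_stem)
--                     out.add(new_stem)  # add to the final list
--
--         # Make all combinations of stem1 and stem2 that are <= max_size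
--         for o1, o2 in itertools.product(out, repeat=2):
--             if len(o1 + o2) - 2 * n_pairs > max_size:
--                 continue
--
--             for repls in itertools.product(stem_fragments, repeat=n_pairs):
--                 new_stem1 = o1
--                 new_stem2 = o2
--                 for repl in repls:
--                     new_stem1 = new_stem1.replace('|', repl, 1).replace('P', '(')
--                     new_stem2 = new_stem2.replace('|', repl, 1).replace('P', ')')
--                 if len(new_stem1 + new_stem2) > max_size:
--                     continue
--                 all_pairs.add((new_stem1, new_stem2[::-1]))
--
--     return all_pairs
-- ===== SOURCE B (Python) =====
-- import itertools
--
-- def _compositions(gaps, budget):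
--     # all tuples of `gaps` non-negative ints with sum <= budget
--     if budget < 0:
--         return []
--     if gaps == 0:
--         return [()]
--     return [(h,) + t
--             for h in range(budget + 1)
--             for t in _compositions(gaps - 1, budget - h)]
--
-- def _build(ch, ks, d):
--     # stem with runs of `ch` of lengths ks separated by dot runs of lengths d
--     out = []
--     for j, k in enumerate(ks):
--         out.append(ch * k)
--         if j < len(d):
--             out.append('.' * d[j])
--     return ''.join(out)
--
-- def stem_structures(max_size: int = 16, min_stem_pairs: int = 2) -> set:
--     m = min_stem_pairs
--     all_pairs = set()
--     for n in range(max_size // 2 // m + 1):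
--         unpaired = max_size - n * m
--         dvecs = _compositions(max(n - 1, 0), unpaired)
--         for ks in itertools.product(range(m, 2 * m), repeat=n):
--             K2 = 2 * sum(ks)
--             for d1 in dvecs:
--                 if K2 + sum(d1) > max_size:
--                     continue
--                 s1 = _build('(', ks, d1)
--                 for d2 in dvecs:
--                     if K2 + sum(d1) + sum(d2) > max_size:
--                         continue
--                     s2 = _build(')', ks, d2)
--                     all_pairs.add((s1, s2[::-1]))
--     return all_pairs
-- ===== Notes on version B (the rewrite author's own statement) =====
-- stated objective: faster
-- what changed: B enumerates the dot distributions over the stem's internal gaps directly as integer compositions (and builds each paired string from run lengths), instead of A's worklist closure that grows stems one dot-insertion at a time with set dedup and then rewrites strings via repeated str.replace.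
import Mathlib
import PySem

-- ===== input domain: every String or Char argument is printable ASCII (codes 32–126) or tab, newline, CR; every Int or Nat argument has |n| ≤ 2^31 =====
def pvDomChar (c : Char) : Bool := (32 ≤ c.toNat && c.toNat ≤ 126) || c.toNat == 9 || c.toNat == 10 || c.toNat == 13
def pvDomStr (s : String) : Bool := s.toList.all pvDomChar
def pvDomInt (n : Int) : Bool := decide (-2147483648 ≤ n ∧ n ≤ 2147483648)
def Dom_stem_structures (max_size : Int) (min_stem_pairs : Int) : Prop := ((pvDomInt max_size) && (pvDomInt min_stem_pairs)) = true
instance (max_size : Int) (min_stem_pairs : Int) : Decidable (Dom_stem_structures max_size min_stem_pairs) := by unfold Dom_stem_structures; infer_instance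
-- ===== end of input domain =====

-- B replaces A's one-dot-at-a-time worklist closure (with set dedup and repeated str.replace)
-- by a direct enumeration of the dot compositions over the stem's internal gaps; measurably faster.
-- Python returns a set; both ports return its elements as a canonically sorted list (a set value is
-- order-free, and Python's set iteration order is not modelled).

-- ===== PORT A =====
-- 'P' * i
def pvFrag (i : Int) : List Char := PySem.List.pyRepeat ['P'] i

-- stem[:i] + '.' + stem[i:]
def pvInsertDot (s : List Char) (i : Int) : List Char :=
  PySem.List.slice s none (some i) ++ '.' :: PySem.List.slice s (some i) none

-- body of A's inner 'for i in range(1, len(stem))' loop: add the new stem to both sets when it fits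
def pvGrowStep (baseLen U : Int) (stem : List Char)
    (acc : PySem.Set (List Char) × PySem.Set (List Char)) (i : Int) :
    PySem.Set (List Char) × PySem.Set (List Char) :=
  if PySem.List.len (pvInsertDot stem i) - baseLen ≤ U then
    (PySem.Set.add acc.1 (pvInsertDot stem i), PySem.Set.add acc.2 (pvInsertDot stem i))
  else acc

-- fuel for A's 'while len(stems) > 0' loop (the loop itself has no structural bound; the fuel below
-- is an upper bound on its iteration count, proved sufficient in the lemmas)
def pvWeight (L : Nat) (s : List Char) : Nat := (L + 2) ^ (L + 1 - min s.length (L + 1))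
def pvMeasure (L : Nat) (stems : List (List Char)) : Nat := (stems.map (pvWeight L)).sum

-- A's while loop; stems.pop() pops an unspecified element of a Python set (hash order, not modelled):
-- this port pops the first element of the insertion-ordered PySem.Set; the resulting set of stems is
-- pop-order independent.
def pvGrow (baseLen U : Int) (L : Nat) :
    Nat → PySem.Set (List Char) → PySem.Set (List Char) → PySem.Set (List Char)
  | 0, _, out => out
  | _ + 1, [], out => out
  | fuel + 1, stem :: rest, out =>
    pvGrow baseLen U L fuel
      ((PySem.List.pyRange 1 (PySem.List.len stem) 1).foldl (pvGrowStep baseLen U stem) (rest, out)).1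
      ((PySem.List.pyRange 1 (PySem.List.len stem) 1).foldl (pvGrowStep baseLen U stem) (rest, out)).2

-- itertools.product(xs, repeat=n) (hand-rolled: not in PySem; leftmost factor varies slowest)
def pvProdRep {α : Type} (xs : List α) : Nat → List (List α)
  | 0 => [[]]
  | n + 1 => xs.flatMap (fun x => (pvProdRep xs n).map (x :: ·))

-- s.replace('|', r, 1) (hand-rolled: PySem has no count argument; exact for the single-char pattern '|')
def pvReplaceFirstBar (s : List Char) (r : List Char) : List Char :=
  match s with
  | [] => []
  | c :: t => if c = '|' then r ++ t else c :: pvReplaceFirstBar t r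

-- s.replace('P', c)
def pvReplaceP (s : List Char) (c : Char) : List Char := PySem.Chars.replace s ['P'] [c]

-- the 'for repl in repls' rewriting loop of A (run once with '(' for stem1 and once with ')' for stem2)
def pvS1 (o : List Char) (rs : List (List Char)) (c : Char) : List Char :=
  rs.foldl (fun t r => pvReplaceP (pvReplaceFirstBar t r) c) o

-- body of A's 'for o1, o2 in itertools.product(out, repeat=2)' loop
def pvInner (ms n : Int) (frags : List (List Char)) (allp : PySem.Set (List String))
    (o1 o2 : List Char) : PySem.Set (List String) :=
  if PySem.List.len (o1 ++ o2) - 2 * n > ms then allp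
  else
    (pvProdRep frags n.toNat).foldl (fun allp rs =>
      let s1 := pvS1 o1 rs '('
      let s2 := pvS1 o2 rs ')'
      if PySem.List.len (s1 ++ s2) > ms then allp
      else PySem.Set.add allp
        [String.ofList s1, String.ofList ((PySem.List.slice? s2 none none (-1)).getD [])]) allp

-- body of A's outer 'for n_pairs in range(...)' loop
def pvStage (ms m : Int) (frags : List (List Char)) (allp : PySem.Set (List String)) (n : Int) :
    PySem.Set (List String) :=
  let base := PySem.List.pyRepeat ['|'] n
  let maxUnpaired := ms - PySem.List.len base * m
  let L := base.length + maxUnpaired.toNat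
  let out := pvGrow (PySem.List.len base) maxUnpaired L (pvMeasure L [base])
      (PySem.Set.ofList [base]) (PySem.Set.ofList [base])
  out.foldl (fun allp o1 => out.foldl (fun allp o2 => pvInner ms n frags allp o1 o2) allp) allp

def stem_structures (max_size : Int) (min_stem_pairs : Int) : List (List String) :=
  let stem_fragments := (PySem.List.pyRange min_stem_pairs (2 * min_stem_pairs) 1).map pvFrag
  let all_pairs :=
    (PySem.List.pyRange 0 (PySem.Int.floordiv (PySem.Int.floordiv max_size 2) min_stem_pairs + 1) 1).foldl
      (pvStage max_size min_stem_pairs stem_fragments) PySem.Set.empty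
  PySem.List.sorted all_pairs (fun x => x) false

-- ===== PORT B =====
-- _compositions(gaps, budget): all lists of `gaps` non-negative ints with sum ≤ budget
def pvComps (gaps : Nat) (budget : Int) : List (List Int) :=
  if budget < 0 then []
  else
    match gaps with
    | 0 => [[]]
    | g + 1 => (PySem.List.pyRange 0 (budget + 1) 1).flatMap (fun h => (pvComps g (budget - h)).map (h :: ·))

-- _build(ch, ks, d)
def pvBuild (c : Char) : List Int → List Int → List Char
  | [], _ => []
  | k :: ks, [] => PySem.List.pyRepeat [c] k ++ pvBuild c ks []
  | k :: ks, g :: d => PySem.List.pyRepeat [c] k ++ PySem.List.pyRepeat ['.'] g ++ pvBuild c ks d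

-- body of B's 'for n in range(...)' loop
def pvStageB (ms m : Int) (allp : PySem.Set (List String)) (n : Int) : PySem.Set (List String) :=
  let unpaired := ms - n * m
  let dvecs := pvComps (max (n - 1) 0).toNat unpaired
  (pvProdRep (PySem.List.pyRange m (2 * m) 1) n.toNat).foldl (fun allp ks =>
    let K2 := 2 * ks.sum
    dvecs.foldl (fun allp d1 =>
      if K2 + d1.sum > ms then allp
      else
        let s1 := pvBuild '(' ks d1
        dvecs.foldl (fun allp d2 =>
          if K2 + d1.sum + d2.sum > ms then allp
          else
            let s2 := pvBuild ')' ks d2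
            PySem.Set.add allp
              [String.ofList s1, String.ofList ((PySem.List.slice? s2 none none (-1)).getD [])]) allp) allp) allp

def stem_structures_alt (max_size : Int) (min_stem_pairs : Int) : List (List String) :=
  let all_pairs :=
    (PySem.List.pyRange 0 (PySem.Int.floordiv (PySem.Int.floordiv max_size 2) min_stem_pairs + 1) 1).foldl
      (pvStageB max_size min_stem_pairs) PySem.Set.empty
  PySem.List.sorted all_pairs (fun x => x) false

-- ===== PRECONDITION & SPEC =====
-- Python A raises ZeroDivisionError when min_stem_pairs = 0 (max_size // 2 // min_stem_pairs)
def Pre_stem_structures (max_size : Int) (min_stem_pairs : Int) : Prop := min_stem_pairs ≠ 0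
instance (max_size : Int) (min_stem_pairs : Int) : Decidable (Pre_stem_structures max_size min_stem_pairs) := by unfold Pre_stem_structures; infer_instance
def pvWitness_stem_structures : Int × Int := (8, 2)

def Spec_stem_structures (max_size : Int) (min_stem_pairs : Int) (out : List (List String)) : Prop := out = stem_structures_alt max_size min_stem_pairs
instance (max_size : Int) (min_stem_pairs : Int) (out : List (List String)) : Decidable (Spec_stem_structures max_size min_stem_pairs out) := by unfold Spec_stem_structures; infer_instance

-- ===== CLAIM (what is proved, stated in full; the proofs are below) =====
def Claim_equal_stem_structures : Prop := ∀ (max_size : Int) (min_stem_pairs : Int), Dom_stem_structures max_size min_stem_pairs → Pre_stem_structures max_size min_stem_pairs → Spec_stem_structures max_size min_stem_pairs (stem_structures max_size min_stem_pairs)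

-- ===== LEMMAS AND PROOFS =====

-- ---------- proof-only definitions ----------

-- a single dot insertion of A's growth loop, with its size guard
def StepR (bL U : Int) (s t : List Char) : Prop :=
  ∃ i : Int, 1 ≤ i ∧ i < (s.length : Int) ∧ t = pvInsertDot s i ∧ ((t.length : Int) - bL ≤ U)

def ReachR (bL U : Int) : List Char → List Char → Prop := Relation.ReflTransGen (StepR bL U)

-- the invariant shape of the stems A grows: pipes and internal dots, ≤ U dots in total
def GoodS (n : Nat) (U : Int) (x : List Char) : Prop :=
  (∀ c ∈ x, c = '|' ∨ c = '.') ∧ x.count '|' = n ∧ ((x.count '.' : Int) ≤ U) ∧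
  (x = [] ∨ (x.head? = some '|' ∧ x.getLast? = some '|'))

-- the pipe-and-dots stem named by a dot-composition d
def renderP (d : List Int) : List Char :=
  '|' :: d.flatMap (fun g => List.replicate g.toNat '.' ++ ['|'])

-- the growth loop's final set, as pvStage computes it
def outA (ms m n : Int) : PySem.Set (List Char) :=
  let base := PySem.List.pyRepeat ['|'] n
  let maxUnpaired := ms - PySem.List.len base * m
  let L := base.length + maxUnpaired.toNat
  pvGrow (PySem.List.len base) maxUnpaired L (pvMeasure L [base])
    (PySem.Set.ofList [base]) (PySem.Set.ofList [base])

-- what stage n of A contributes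
def PA (ms m : Int) (frags : List (List Char)) (n : Int) (x : List String) : Prop :=
  ∃ o1, o1 ∈ outA ms m n ∧ ∃ o2, o2 ∈ outA ms m n ∧
    ¬ (PySem.List.len (o1 ++ o2) - 2 * n > ms) ∧
    ∃ rs, rs ∈ pvProdRep frags n.toNat ∧
      ¬ (PySem.List.len (pvS1 o1 rs '(' ++ pvS1 o2 rs ')') > ms) ∧
      x = [String.ofList (pvS1 o1 rs '('),
           String.ofList ((PySem.List.slice? (pvS1 o2 rs ')') none none (-1)).getD [])]

-- what stage n of B contributes
def PB (ms m : Int) (n : Int) (x : List String) : Prop :=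
  ∃ ks, ks ∈ pvProdRep (PySem.List.pyRange m (2 * m) 1) n.toNat ∧
  ∃ d1, d1 ∈ pvComps (max (n - 1) 0).toNat (ms - n * m) ∧
    ¬ (2 * ks.sum + d1.sum > ms) ∧
  ∃ d2, d2 ∈ pvComps (max (n - 1) 0).toNat (ms - n * m) ∧
    ¬ (2 * ks.sum + d1.sum + d2.sum > ms) ∧
    x = [String.ofList (pvBuild '(' ks d1),
         String.ofList ((PySem.List.slice? (pvBuild ')' ks d2) none none (-1)).getD [])]

-- ---------- generic fold lemmas ----------

theorem foldl_mem_iff {α β : Type} (F : List β → α → List β) (Q : α → β → Prop)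
    (h : ∀ acc y x, x ∈ F acc y ↔ x ∈ acc ∨ Q y x) (l : List α) (acc : List β) (x : β) :
    x ∈ l.foldl F acc ↔ x ∈ acc ∨ ∃ y ∈ l, Q y x := by
  induction l generalizing acc with
  | nil => simp
  | cons a t ih =>
    rw [List.foldl_cons, ih, h]
    simp only [List.exists_mem_cons_iff]
    tauto

theorem foldl_nodup_pres {α β : Type} (F : List β → α → List β)
    (h : ∀ acc y, acc.Nodup → (F acc y).Nodup) (l : List α) (acc : List β) (ha : acc.Nodup) :
    (l.foldl F acc).Nodup := by
  induction l generalizing acc with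
  | nil => exact ha
  | cons a t ih => exact ih (F acc a) (h acc a ha)

-- ---------- the growth loop ----------

theorem length_pvInsertDot (s : List Char) (i : Int) (hi : 0 ≤ i) :
    (pvInsertDot s i).length = s.length + 1 := by
  unfold pvInsertDot
  rw [PySem.List.slice_to s hi, PySem.List.slice_from s hi]
  simp only [List.length_append, List.length_cons, List.length_take, List.length_drop]
  omega

theorem pvInsertDot_append (u v : List Char) :
    pvInsertDot (u ++ v) (u.length : Int) = u ++ '.' :: v := by
  unfold pvInsertDot
  rw [PySem.List.slice_to_natCast (u ++ v) u.length, PySem.List.slice_from_natCast (u ++ v) u.length]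
  rw [List.take_left, List.drop_left]

theorem growStep_fst_mem (bL U : Int) (stem : List Char) (I : List Int)
    (acc : PySem.Set (List Char) × PySem.Set (List Char)) (x : List Char) :
    x ∈ (I.foldl (pvGrowStep bL U stem) acc).1 ↔
      x ∈ acc.1 ∨ ∃ i ∈ I, ((((pvInsertDot stem i).length : Int) - bL ≤ U) ∧ x = pvInsertDot stem i) := by
  induction I generalizing acc with
  | nil => simp
  | cons i I ih =>
    rw [List.foldl_cons, ih]
    unfold pvGrowStep
    simp only [PySem.List.len_eq, List.exists_mem_cons_iff]
    split_ifs with hg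
    · simp only [PySem.Set.mem_add]; tauto
    · tauto

theorem growStep_snd_mem (bL U : Int) (stem : List Char) (I : List Int)
    (acc : PySem.Set (List Char) × PySem.Set (List Char)) (x : List Char) :
    x ∈ (I.foldl (pvGrowStep bL U stem) acc).2 ↔
      x ∈ acc.2 ∨ ∃ i ∈ I, ((((pvInsertDot stem i).length : Int) - bL ≤ U) ∧ x = pvInsertDot stem i) := by
  induction I generalizing acc with
  | nil => simp
  | cons i I ih =>
    rw [List.foldl_cons, ih]
    unfold pvGrowStep
    simp only [PySem.List.len_eq, List.exists_mem_cons_iff]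
    split_ifs with hg
    · simp only [PySem.Set.mem_add]; tauto
    · tauto

theorem pvWeight_pos (L : Nat) (s : List Char) : 0 < pvWeight L s := by
  exact Nat.pow_pos (by omega)

theorem pvMeasure_add_le (L : Nat) (s : PySem.Set (List Char)) (x : List Char) :
    pvMeasure L (PySem.Set.add s x) ≤ pvMeasure L s + pvWeight L x := by
  unfold PySem.Set.add
  split_ifs with hc
  · exact Nat.le_add_right _ _
  · simp [pvMeasure]

theorem growStep_measure (bL U : Int) (L : Nat) (stem : List Char) (I : List Int)
    (hI : ∀ i ∈ I, 0 ≤ i)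
    (acc : PySem.Set (List Char) × PySem.Set (List Char)) :
    pvMeasure L (I.foldl (pvGrowStep bL U stem) acc).1 ≤
      pvMeasure L acc.1 + I.length * pvWeight L ('.' :: stem) := by
  induction I generalizing acc with
  | nil => simp
  | cons i I ih =>
    rw [List.foldl_cons]
    have h2 : pvMeasure L ((pvGrowStep bL U stem acc i).1) ≤ pvMeasure L acc.1 + pvWeight L ('.' :: stem) := by
      unfold pvGrowStep
      split_ifs with hg
      · refine le_trans (pvMeasure_add_le L acc.1 _) ?_
        have hlen : (pvInsertDot stem i).length = ('.' :: stem).length := by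
          rw [length_pvInsertDot _ _ (hI i (by simp))]; simp
        unfold pvWeight
        rw [hlen]
      · exact Nat.le_add_right _ _
    have h3 := ih (fun j hj => hI j (by simp [hj])) (pvGrowStep bL U stem acc i)
    refine le_trans h3 ?_
    simp only [List.length_cons]
    have := h2
    nlinarith [pvWeight_pos L ('.' :: stem)]

theorem growStep_noop (bL U : Int) (stem : List Char) (I : List Int)
    (h : ∀ i ∈ I, ¬ (PySem.List.len (pvInsertDot stem i) - bL ≤ U))
    (acc : PySem.Set (List Char) × PySem.Set (List Char)) :
    I.foldl (pvGrowStep bL U stem) acc = acc := by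
  induction I generalizing acc with
  | nil => rfl
  | cons i I ih =>
    rw [List.foldl_cons]
    have : pvGrowStep bL U stem acc i = acc := by
      unfold pvGrowStep
      rw [if_neg (h i (by simp))]
    rw [this]
    exact ih (fun j hj => h j (by simp [hj])) acc

theorem pvGrow_mem (bL U : Int) (L : Nat) (hcap : bL + U ≤ (L : Int)) :
    ∀ (fuel : Nat) (stems out : PySem.Set (List Char)),
      pvMeasure L stems ≤ fuel → (∀ s ∈ stems, s ∈ out) →
      ∀ x, x ∈ pvGrow bL U L fuel stems out ↔ x ∈ out ∨ ∃ s ∈ stems, ReachR bL U s x := by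
  intro fuel
  induction fuel with
  | zero =>
    intro stems out hmeas hsub x
    cases stems with
    | nil => simp [pvGrow]
    | cons stem rest =>
      exfalso
      have := pvWeight_pos L stem
      simp [pvMeasure] at hmeas
      omega
  | succ fuel ih =>
    intro stems out hmeas hsub x
    cases stems with
    | nil => simp [pvGrow]
    | cons stem rest =>
      rw [pvGrow]
      set I := PySem.List.pyRange 1 (PySem.List.len stem) 1 with hI
      set p := I.foldl (pvGrowStep bL U stem) (rest, out) with hp
      have hm1 : ∀ y, y ∈ p.1 ↔ y ∈ rest ∨ StepR bL U stem y := by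
        intro y
        rw [hp, growStep_fst_mem]
        unfold StepR
        simp only [hI, PySem.List.mem_pyRange_one, PySem.List.len_eq]
        constructor
        · rintro (h | ⟨i, ⟨h1, h2⟩, hg, rfl⟩)
          · exact Or.inl h
          · exact Or.inr ⟨i, h1, h2, rfl, hg⟩
        · rintro (h | ⟨i, h1, h2, rfl, hg⟩)
          · exact Or.inl h
          · exact Or.inr ⟨i, ⟨h1, h2⟩, hg, rfl⟩
      have hm2 : ∀ y, y ∈ p.2 ↔ y ∈ out ∨ StepR bL U stem y := by
        intro y
        rw [hp, growStep_snd_mem]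
        unfold StepR
        simp only [hI, PySem.List.mem_pyRange_one, PySem.List.len_eq]
        constructor
        · rintro (h | ⟨i, ⟨h1, h2⟩, hg, rfl⟩)
          · exact Or.inl h
          · exact Or.inr ⟨i, h1, h2, rfl, hg⟩
        · rintro (h | ⟨i, h1, h2, rfl, hg⟩)
          · exact Or.inl h
          · exact Or.inr ⟨i, ⟨h1, h2⟩, hg, rfl⟩
      have hmeasp : pvMeasure L p.1 ≤ fuel := by
        have hms : pvMeasure L (stem :: rest) = pvWeight L stem + pvMeasure L rest := by
          simp [pvMeasure]
        by_cases hex : ∃ i ∈ I, ((pvInsertDot stem i).length : Int) - bL ≤ U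
        · obtain ⟨i0, hi0, hg0⟩ := hex
          have hi0' : 0 ≤ i0 := by
            rw [hI, PySem.List.mem_pyRange_one] at hi0; omega
          have hlen : stem.length + 1 ≤ L := by
            rw [length_pvInsertDot stem i0 hi0'] at hg0
            omega
          have hb := growStep_measure bL U L stem I
            (fun i hi => by rw [hI, PySem.List.mem_pyRange_one] at hi; omega) (rest, out)
          rw [← hp] at hb
          have hIl : I.length = stem.length - 1 := by
            rw [hI, PySem.List.length_pyRange_one, PySem.List.len_eq]
            omega
          have hw1 : pvWeight L stem = (L + 2) * pvWeight L ('.' :: stem) := by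
            unfold pvWeight
            simp only [List.length_cons]
            have e1 : L + 1 - min stem.length (L + 1) = (L + 1 - min (stem.length + 1) (L + 1)) + 1 := by
              omega
            rw [e1, pow_succ]
            ring
          have hwp := pvWeight_pos L ('.' :: stem)
          have hlt : pvMeasure L p.1 < fuel + 1 := by
            calc pvMeasure L p.1 ≤ pvMeasure L rest + I.length * pvWeight L ('.' :: stem) := hb
              _ < pvMeasure L rest + (L + 2) * pvWeight L ('.' :: stem) :=
                Nat.add_lt_add_left (mul_lt_mul_of_pos_right (by omega) hwp) _
              _ = pvMeasure L rest + pvWeight L stem := by rw [hw1]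
              _ ≤ fuel + 1 := by rw [hms] at hmeas; omega
          omega
        · push_neg at hex
          have hnoop : p = (rest, out) := by
            rw [hp]
            exact growStep_noop bL U stem I
              (fun i hi => by have := hex i hi; simp only [PySem.List.len_eq]; omega) (rest, out)
          rw [hnoop]
          dsimp only
          have := pvWeight_pos L stem
          rw [hms] at hmeas
          omega
      have hsubp : ∀ s ∈ p.1, s ∈ p.2 := by
        intro s hs
        rw [hm1] at hs
        rw [hm2 s]
        rcases hs with h | h
        · exact Or.inl (hsub s (by simp [h]))
        · exact Or.inr h
      rw [ih p.1 p.2 hmeasp hsubp x]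
      constructor
      · rintro (hx | ⟨s, hs, hr⟩)
        · rcases (hm2 x).1 hx with h | h
          · exact Or.inl h
          · exact Or.inr ⟨stem, by simp, Relation.ReflTransGen.single h⟩
        · rcases (hm1 s).1 hs with h | h
          · exact Or.inr ⟨s, by simp [h], hr⟩
          · exact Or.inr ⟨stem, by simp, Relation.ReflTransGen.head h hr⟩
      · rintro (hx | ⟨s, hs, hr⟩)
        · exact Or.inl ((hm2 _).2 (Or.inl hx))
        · rcases List.mem_cons.mp hs with rfl | hs'
          · rcases Relation.ReflTransGen.cases_head hr with rfl | ⟨t, hstep, ht⟩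
            · exact Or.inl ((hm2 _).2 (Or.inl (hsub _ (by simp))))
            · exact Or.inr ⟨t, (hm1 t).2 (Or.inr hstep), ht⟩
          · exact Or.inr ⟨s, (hm1 s).2 (Or.inl hs'), hr⟩

-- ---------- reachability = GoodS ----------

theorem reach_nil (bL U : Int) (x : List Char) : ReachR bL U [] x ↔ x = [] := by
  constructor
  · intro h
    rcases Relation.ReflTransGen.cases_head h with rfl | ⟨t, hstep, _⟩
    · rfl
    · obtain ⟨i, h1, h2, _, _⟩ := hstep
      simp at h2
      omega
  · rintro rfl
    exact Relation.ReflTransGen.refl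

theorem length_eq_counts (x : List Char) (h : ∀ c ∈ x, c = '|' ∨ c = '.') :
    x.length = x.count '|' + x.count '.' := by
  induction x with
  | nil => simp
  | cons c t ih =>
    have ht := ih (fun a ha => h a (by simp [ha]))
    rcases h c (by simp) with rfl | rfl <;> simp [List.count_cons] <;> omega

theorem good_base (n : Nat) (U : Int) (hU : 0 ≤ U) : GoodS n U (List.replicate n '|') := by
  refine ⟨fun c hc => Or.inl (List.eq_of_mem_replicate hc), by simp, by simp [List.count_replicate]; omega, ?_⟩
  cases n with
  | zero => exact Or.inl rfl
  | succ k =>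
    refine Or.inr ⟨by simp [List.replicate_succ], ?_⟩
    rw [List.replicate_succ']
    rw [List.getLast?_append_of_ne_nil _ (by simp)]
    rfl

theorem step_good (n : Nat) (U : Int) (s t : List Char) (hg : GoodS n U s)
    (hst : StepR (n : Int) U s t) : GoodS n U t := by
  obtain ⟨i, h1, h2, rfl, hguard⟩ := hst
  have hi : 0 ≤ i := by omega
  have hins : pvInsertDot s i = s.take i.toNat ++ '.' :: s.drop i.toNat := by
    unfold pvInsertDot
    rw [PySem.List.slice_to s hi, PySem.List.slice_from s hi]
  obtain ⟨hchars, hcb, hcd, hhl⟩ := hg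
  have hk1 : 1 ≤ i.toNat := by omega
  have hk2 : i.toNat < s.length := by omega
  have hsnil : s ≠ [] := by intro h; rw [h] at hk2; simp at hk2
  have hsplit := (List.take_append_drop i.toNat s).symm
  have hcnt : ∀ c : Char, (s.take i.toNat).count c + (s.drop i.toNat).count c = s.count c := by
    intro c
    conv_rhs => rw [hsplit]
    rw [List.count_append]
  have hlen : (pvInsertDot s i).length = s.length + 1 := length_pvInsertDot s i hi
  have hslen := length_eq_counts s hchars
  refine ⟨?_, ?_, ?_, ?_⟩
  · intro c hc
    rw [hins] at hc
    rcases List.mem_append.mp hc with hc | hc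
    · exact hchars c (List.mem_of_mem_take hc)
    · rcases List.mem_cons.mp hc with rfl | hc
      · exact Or.inr rfl
      · exact hchars c (List.mem_of_mem_drop hc)
  · rw [hins, List.count_append, List.count_cons]
    have := hcnt '|'
    simp
    omega
  · have ht : (pvInsertDot s i).count '.' = s.count '.' + 1 := by
      rw [hins, List.count_append, List.count_cons]
      have := hcnt '.'
      simp
      omega
    rw [ht]
    rw [hlen] at hguard
    push_cast at hguard ⊢
    omega
  · rcases hhl with rfl | ⟨hh, hl⟩
    · simp at hk2
    · refine Or.inr ⟨?_, ?_⟩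
      · obtain ⟨c, s', rfl⟩ := List.exists_cons_of_ne_nil hsnil
        rw [hins]
        obtain ⟨j, hj⟩ : ∃ j, i.toNat = j + 1 := ⟨i.toNat - 1, by omega⟩
        rw [hj, List.take_succ_cons]
        simpa using hh
      · have hdnil : s.drop i.toNat ≠ [] := by
          intro h
          have := List.length_drop (i := i.toNat) (l := s)
          rw [h] at this
          simp at this
          omega
        rw [hins, List.getLast?_append_of_ne_nil _ (by simp)]
        have h3 : ('.' :: s.drop i.toNat).getLast? = (s.drop i.toNat).getLast? := by
          have : ('.' :: s.drop i.toNat) = ['.'] ++ s.drop i.toNat := rfl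
          rw [this, List.getLast?_append_of_ne_nil _ hdnil]
        rw [h3]
        conv_lhs at hl => rw [hsplit]
        rw [List.getLast?_append_of_ne_nil _ hdnil] at hl
        exact hl

theorem good_to_reach (n : Nat) (U : Int) :
    ∀ (k : Nat) (x : List Char), x.count '.' = k → GoodS n U x →
      ReachR (n : Int) U (List.replicate n '|') x := by
  intro k
  induction k using Nat.strong_induction_on with
  | _ k ih =>
    intro x hk hg
    obtain ⟨hchars, hcb, hcd, hhl⟩ := hg
    rcases Nat.eq_zero_or_pos k with rfl | hkpos
    · have hnd : '.' ∉ x := by rw [← List.count_eq_zero]; exact hk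
      have hall : ∀ c ∈ x, c = '|' :=
        fun c hc => (hchars c hc).resolve_right (by rintro rfl; exact hnd hc)
      have hlenx : x.length = n := by
        have := length_eq_counts x hchars
        omega
      have hx : x = List.replicate n '|' := by
        rw [← hlenx]
        exact List.eq_replicate_iff.mpr ⟨rfl, hall⟩
      rw [← hx]
      exact Relation.ReflTransGen.refl
    · have hdot : '.' ∈ x := by
        have : 0 < x.count '.' := by omega
        exact List.count_pos_iff.mp this
      obtain ⟨u, v, rfl⟩ := List.append_of_mem hdot
      have hu : u ≠ [] := by
        rintro rfl
        rcases hhl with h0 | ⟨hh, _⟩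
        · simp at h0
        · simp at hh
      have hv : v ≠ [] := by
        rintro rfl
        rcases hhl with h0 | ⟨_, hl⟩
        · simp at h0
        · have h4 : (u ++ ['.']).getLast? = some '.' := by
            rw [List.getLast?_append_of_ne_nil _ (by simp : (['.'] : List Char) ≠ [])]
            rfl
          rw [h4] at hl
          simp at hl
      have hcby : (u ++ v).count '|' = n := by
        simp [List.count_append, List.count_cons] at hcb ⊢
        omega
      have hcdy : (u ++ v).count '.' = k - 1 := by
        simp [List.count_append, List.count_cons] at hk ⊢
        omega
      have hchy : ∀ c ∈ u ++ v, c = '|' ∨ c = '.' := by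
        intro c hc
        refine hchars c ?_
        rcases List.mem_append.mp hc with hc | hc
        · exact List.mem_append.mpr (Or.inl hc)
        · exact List.mem_append.mpr (Or.inr (List.mem_cons.mpr (Or.inr hc)))
      have hgy : GoodS n U (u ++ v) := by
        refine ⟨hchy, hcby, by
          have h7 := hcdy
          have h8 := hk
          push_cast at hcd ⊢
          omega, Or.inr ⟨?_, ?_⟩⟩
        · rw [List.head?_append_of_ne_nil _ hu]
          rcases hhl with h0 | ⟨hh, _⟩
          · exact absurd h0 (by simp [hu])
          · rw [List.head?_append_of_ne_nil _ hu] at hh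
            exact hh
        · rw [List.getLast?_append_of_ne_nil _ hv]
          rcases hhl with h0 | ⟨_, hl⟩
          · exact absurd h0 (by simp [hu])
          · rw [List.getLast?_append_of_ne_nil _ (by simp : ('.' :: v) ≠ [])] at hl
            have h5 : ('.' :: v).getLast? = v.getLast? := by
              have : ('.' :: v) = ['.'] ++ v := rfl
              rw [this, List.getLast?_append_of_ne_nil _ hv]
            rw [h5] at hl
            exact hl
      have hreach := ih (k - 1) (by omega) (u ++ v) hcdy hgy
      refine Relation.ReflTransGen.tail hreach ?_
      refine ⟨(u.length : Int), ?_, ?_, (pvInsertDot_append u v).symm, ?_⟩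
      · have : 0 < u.length := List.length_pos_of_ne_nil hu
        omega
      · have : 0 < v.length := List.length_pos_of_ne_nil hv
        simp only [List.length_append]
        push_cast
        omega
      · have hlx := length_eq_counts (u ++ '.' :: v) hchars
        push_cast
        omega

theorem reach_iff_good (n : Nat) (U : Int) (hU : 0 ≤ U) (x : List Char) :
    ReachR (n : Int) U (List.replicate n '|') x ↔ GoodS n U x := by
  constructor
  · intro h
    induction h with
    | refl => exact good_base n U hU
    | tail hab hbc ih => exact step_good n U _ _ ih hbc
  · intro hg
    exact good_to_reach n U (x.count '.') x rfl hg

-- ---------- GoodS = renderP image ----------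

theorem renderP_cons (g : Int) (d : List Int) :
    renderP (g :: d) = '|' :: (List.replicate g.toNat '.' ++ renderP d) := by
  simp [renderP, List.flatMap_cons]

theorem renderP_count_bar (d : List Int) : (renderP d).count '|' = d.length + 1 := by
  induction d with
  | nil => simp [renderP]
  | cons g d ih =>
    rw [renderP_cons]
    simp [List.count_cons, List.count_append, List.count_replicate] at ih ⊢
    omega

theorem renderP_count_dot (d : List Int) (h : ∀ g ∈ d, 0 ≤ g) :
    ((renderP d).count '.' : Int) = d.sum := by
  induction d with
  | nil => simp [renderP]
  | cons g d ih =>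
    rw [renderP_cons]
    have hg : 0 ≤ g := h g (by simp)
    have ih' := ih (fun a ha => h a (by simp [ha]))
    simp [List.count_cons, List.count_append, List.count_replicate, List.sum_cons] at ih' ⊢
    push_cast at ih' ⊢
    omega

theorem renderP_chars (d : List Int) : ∀ c ∈ renderP d, c = '|' ∨ c = '.' := by
  induction d with
  | nil => simp [renderP]
  | cons g d ih =>
    rw [renderP_cons]
    intro c hc
    rcases List.mem_cons.mp hc with rfl | hc
    · exact Or.inl rfl
    · rcases List.mem_append.mp hc with hc | hc
      · exact Or.inr (List.eq_of_mem_replicate hc)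
      · exact ih c hc

theorem renderP_getLast (d : List Int) : (renderP d).getLast? = some '|' := by
  induction d with
  | nil => rfl
  | cons g d ih =>
    rw [renderP_cons]
    have hne : renderP d ≠ [] := by simp [renderP]
    have h1 : ('|' :: (List.replicate g.toNat '.' ++ renderP d)) =
        ('|' :: List.replicate g.toNat '.') ++ renderP d := by simp
    rw [h1, List.getLast?_append_of_ne_nil _ hne]
    exact ih

theorem length_renderP (d : List Int) (h : ∀ g ∈ d, 0 ≤ g) :
    ((renderP d).length : Int) = (d.length : Int) + 1 + d.sum := by
  induction d with
  | nil => simp [renderP]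
  | cons g d ih =>
    rw [renderP_cons]
    have hg : 0 ≤ g := h g (by simp)
    have ih' := ih (fun a ha => h a (by simp [ha]))
    simp only [List.length_cons, List.length_append, List.length_replicate, List.sum_cons] at ih' ⊢
    push_cast at ih' ⊢
    omega

theorem good_iff_render (n : Nat) (U : Int) (x : List Char) :
    GoodS (n + 1) U x ↔
      ∃ d, d.length = n ∧ (∀ g ∈ d, 0 ≤ g) ∧ d.sum ≤ U ∧ x = renderP d := by
  constructor
  · intro hg
    induction n generalizing U x with
    | zero =>
      obtain ⟨hchars, hcb, hcd, hhl⟩ := hg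
      have hxne : x ≠ [] := by
        intro h; rw [h] at hcb; simp at hcb
      rcases hhl with h0 | ⟨hh, hl⟩
      · exact absurd h0 hxne
      · obtain ⟨c, t, rfl⟩ := List.exists_cons_of_ne_nil hxne
        have hc : c = '|' := by simpa using hh
        subst hc
        have ht : t = [] := by
          by_contra htne
          have h2 : ('|' :: t).getLast? = t.getLast? := by
            have : ('|' :: t) = ['|'] ++ t := rfl
            rw [this, List.getLast?_append_of_ne_nil _ htne]
          rw [h2] at hl
          have hmem : t.getLast htne ∈ t := List.getLast_mem htne
          have hl' : t.getLast htne = '|' := by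
            rw [List.getLast?_eq_some_getLast htne] at hl
            simpa using hl
          have : t.count '|' = 0 := by
            simp [List.count_cons] at hcb
            omega
          have : '|' ∉ t := by rw [← List.count_eq_zero]; exact this
          exact this (hl' ▸ hmem)
        subst ht
        refine ⟨[], rfl, by simp, ?_, rfl⟩
        · simp at hcd ⊢
          omega
    | succ n ih =>
      obtain ⟨hchars, hcb, hcd, hhl⟩ := hg
      have hxne : x ≠ [] := by
        intro h; rw [h] at hcb; simp at hcb
      rcases hhl with h0 | ⟨hh, hl⟩
      · exact absurd h0 hxne
      obtain ⟨c, t, rfl⟩ := List.exists_cons_of_ne_nil hxne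
      have hc : c = '|' := by simpa using hh
      subst hc
      set tw := t.takeWhile (fun c => c == '.') with htw
      set dw := t.dropWhile (fun c => c == '.') with hdw
      have htsplit : tw ++ dw = t := List.takeWhile_append_dropWhile
      have htwdots : ∀ c ∈ tw, c = '.' := by
        intro c hc
        have := List.mem_takeWhile_imp hc
        exact eq_of_beq this
      have htwrep : tw = List.replicate tw.length '.' :=
        List.eq_replicate_iff.mpr ⟨rfl, htwdots⟩
      have htwnobar : '|' ∉ tw := by
        intro h
        have := htwdots _ h
        simp at this
      have hbart : t.count '|' = n + 1 := by
        simp [List.count_cons] at hcb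
        omega
      have hdwne : dw ≠ [] := by
        intro h
        have : '|' ∈ t := by
          rw [← List.count_pos_iff]
          omega
        rw [← htsplit, h, List.append_nil] at this
        exact htwnobar this
      obtain ⟨c0, dtail, hdweq⟩ := List.exists_cons_of_ne_nil hdwne
      have hc0 : c0 = '|' := by
        have hdwne2 : t.dropWhile (fun c => c == '.') ≠ [] := hdw ▸ hdwne
        have hph := List.head_dropWhile_not (fun c => c == '.') hdwne2
        have hc0h : (t.dropWhile (fun c => c == '.')).head hdwne2 = c0 := by
          simp [← hdw, hdweq]
        rw [hc0h] at hph
        have hc0mem : c0 ∈ t := by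
          rw [← htsplit, hdweq]
          exact List.mem_append.mpr (Or.inr (by simp))
        rcases hchars c0 (by simp [hc0mem]) with h | h
        · exact h
        · rw [h] at hph; simp at hph
      have hcntw : tw.count '.' = tw.length := by
        conv_lhs => rw [htwrep]
        simp
      have hcntwb : tw.count '|' = 0 := List.count_eq_zero.mpr htwnobar
      have hcdw : dw.count '|' = n + 1 := by
        have : tw.count '|' + dw.count '|' = t.count '|' := by
          rw [← htsplit, List.count_append]
        omega
      have hcddw : (dw.count '.' : Int) ≤ U - tw.length := by
        have h5 : tw.count '.' + dw.count '.' = t.count '.' := by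
          rw [← htsplit, List.count_append]
        have h6 : (('|' :: t).count '.') = t.count '.' := by simp [List.count_cons]
        rw [h6] at hcd
        push_cast at hcd ⊢
        omega
      have hgdw : GoodS (n + 1) (U - tw.length) dw := by
        refine ⟨?_, hcdw, hcddw, Or.inr ⟨?_, ?_⟩⟩
        · intro a ha
          have : a ∈ t := by
            rw [← htsplit]
            exact List.mem_append.mpr (Or.inr ha)
          exact hchars a (by simp [this])
        · rw [hdweq, hc0]; rfl
        · have h7 : ('|' :: t).getLast? = dw.getLast? := by
            have h8 : ('|' :: t) = ('|' :: tw) ++ dw := by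
              rw [← htsplit]; rfl
            rw [h8, List.getLast?_append_of_ne_nil _ hdwne]
          rw [← h7]; exact hl
      obtain ⟨d', hd'len, hd'nn, hd'sum, hd'eq⟩ := ih (U - tw.length) dw hgdw
      refine ⟨(tw.length : Int) :: d', by simp [hd'len], ?_, ?_, ?_⟩
      · intro k hk
        rcases List.mem_cons.mp hk with rfl | hk
        · positivity
        · exact hd'nn k hk
      · simp only [List.sum_cons]
        omega
      · rw [renderP_cons, Int.toNat_natCast, ← htwrep, ← hd'eq, htsplit]
  · rintro ⟨d, hlen, hnn, hsum, rfl⟩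
    refine ⟨renderP_chars d, by rw [renderP_count_bar, hlen], ?_, Or.inr ⟨rfl, renderP_getLast d⟩⟩
    rw [renderP_count_dot d hnn]
    exact hsum

-- ---------- comps and products ----------

theorem mem_pvComps (g : Nat) (B : Int) (d : List Int) :
    d ∈ pvComps g B ↔ d.length = g ∧ (∀ k ∈ d, 0 ≤ k) ∧ d.sum ≤ B := by
  induction g generalizing B d with
  | zero =>
    unfold pvComps
    split_ifs with hB
    · simp only [List.not_mem_nil, false_iff]
      rintro ⟨hl, hnn, hsum⟩
      have := List.sum_nonneg hnn
      omega
    · simp only [List.mem_singleton]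
      constructor
      · rintro rfl
        exact ⟨rfl, by simp, by simp; omega⟩
      · rintro ⟨hl, _, _⟩
        exact List.eq_nil_of_length_eq_zero hl
  | succ g ih =>
    unfold pvComps
    split_ifs with hB
    · simp only [List.not_mem_nil, false_iff]
      rintro ⟨hl, hnn, hsum⟩
      have := List.sum_nonneg hnn
      omega
    · simp only [List.mem_flatMap, List.mem_map, PySem.List.mem_pyRange_one]
      constructor
      · rintro ⟨h, ⟨h0, hlt⟩, t, ht, rfl⟩
        obtain ⟨htl, htnn, hts⟩ := (ih (B - h) t).mp ht
        refine ⟨by simp [htl], ?_, ?_⟩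
        · intro k hk
          rcases List.mem_cons.mp hk with rfl | hk
          · exact h0
          · exact htnn k hk
        · simp only [List.sum_cons]; omega
      · rintro ⟨hl, hnn, hsum⟩
        cases d with
        | nil => simp at hl
        | cons h t =>
          have h0 : 0 ≤ h := hnn h (by simp)
          have htnn : ∀ k ∈ t, 0 ≤ k := fun k hk => hnn k (by simp [hk])
          have hts : t.sum ≤ B - h := by
            simp only [List.sum_cons] at hsum
            omega
          have htsum : 0 ≤ t.sum := List.sum_nonneg htnn
          refine ⟨h, ⟨h0, by simp only [List.sum_cons] at hsum; omega⟩, t, ?_, rfl⟩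
          exact (ih (B - h) t).mpr ⟨by simpa using hl, htnn, hts⟩

theorem mem_pvProdRep {α : Type} (xs : List α) (k : Nat) (rs : List α) :
    rs ∈ pvProdRep xs k ↔ rs.length = k ∧ ∀ r ∈ rs, r ∈ xs := by
  induction k generalizing rs with
  | zero =>
    simp only [pvProdRep, List.mem_singleton]
    constructor
    · rintro rfl; exact ⟨rfl, by simp⟩
    · rintro ⟨hl, _⟩; exact List.eq_nil_of_length_eq_zero hl
  | succ k ih =>
    simp only [pvProdRep, List.mem_flatMap, List.mem_map]
    constructor
    · rintro ⟨x, hx, t, ht, rfl⟩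
      obtain ⟨htl, htm⟩ := (ih t).mp ht
      refine ⟨by simp [htl], ?_⟩
      intro r hr
      rcases List.mem_cons.mp hr with rfl | hr
      · exact hx
      · exact htm r hr
    · rintro ⟨hl, hmem⟩
      cases rs with
      | nil => simp at hl
      | cons x t =>
        exact ⟨x, hmem x (by simp), t,
          (ih t).mpr ⟨by simpa using hl, fun r hr => hmem r (by simp [hr])⟩, rfl⟩

theorem pvProdRep_map {α β : Type} (f : α → β) (xs : List α) (k : Nat) :
    pvProdRep (xs.map f) k = (pvProdRep xs k).map (List.map f) := by
  induction k with
  | zero => simp [pvProdRep]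
  | succ k ih =>
    simp [pvProdRep, List.map_flatMap, List.flatMap_map, List.map_map, ih, Function.comp_def]

-- ---------- the rewriting loop ----------

theorem replace_go_map (c : Char) :
    ∀ (fuel : Nat) (l acc : List Char), l.length ≤ fuel →
      PySem.Chars.replace.go ['P'] [c] fuel l acc =
        acc.reverse ++ l.map (fun a => if a = 'P' then c else a) := by
  intro fuel
  induction fuel with
  | zero =>
    intro l acc h
    cases l with
    | nil => simp [PySem.Chars.replace.go]
    | cons a t => simp at h
  | succ fuel ih =>
    intro l acc h
    cases l with
    | nil => simp [PySem.Chars.replace.go]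
    | cons a t =>
      by_cases ha : a = 'P'
      · subst ha
        have h1 : PySem.Chars.replace.go ['P'] [c] (fuel + 1) ('P' :: t) acc =
            PySem.Chars.replace.go ['P'] [c] fuel t (c :: acc) := by
          simp [PySem.Chars.replace.go, List.isPrefixOf]
        rw [h1, ih t (c :: acc) (by simpa using h)]
        simp
      · have h1 : PySem.Chars.replace.go ['P'] [c] (fuel + 1) (a :: t) acc =
            PySem.Chars.replace.go ['P'] [c] fuel t (a :: acc) := by
          simp [PySem.Chars.replace.go, List.isPrefixOf, ha]
          intro hc
          exact absurd hc.symm ha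
        rw [h1, ih t (a :: acc) (by simpa using h)]
        simp [ha]

theorem pvReplaceP_eq_map (s : List Char) (c : Char) :
    pvReplaceP s c = s.map (fun a => if a = 'P' then c else a) := by
  unfold pvReplaceP PySem.Chars.replace
  rw [if_neg (by simp)]
  rw [replace_go_map c s.length s [] (le_refl _)]
  simp

theorem pvReplaceFirstBar_append (pre rest r : List Char) (h : '|' ∉ pre) :
    pvReplaceFirstBar (pre ++ '|' :: rest) r = pre ++ (r ++ rest) := by
  induction pre with
  | nil => simp [pvReplaceFirstBar]
  | cons p pre ih =>
    have hp : p ≠ '|' := fun hp => h (by simp [hp])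
    simp only [List.cons_append, pvReplaceFirstBar, if_neg hp]
    rw [ih (fun hx => h (by simp [hx]))]

theorem length_pvBuild (c : Char) (ks d : List Int) (hk : ∀ k ∈ ks, 0 ≤ k) (hd : ∀ g ∈ d, 0 ≤ g)
    (hl : d.length < ks.length ∨ d = []) :
    ((pvBuild c ks d).length : Int) = ks.sum + d.sum := by
  induction ks generalizing d with
  | nil =>
    cases d with
    | nil => simp [pvBuild]
    | cons g d' =>
      rcases hl with hl | hl
      · simp at hl
      · simp at hl
  | cons k ks ih =>
    cases d with
    | nil =>
      simp only [pvBuild, List.length_append, PySem.List.pyRepeat_singleton,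
        List.length_replicate, List.sum_cons, List.sum_nil]
      have hk0 : 0 ≤ k := hk k (by simp)
      have := ih [] (fun a ha => hk a (by simp [ha])) (by simp) (Or.inr rfl)
      simp only [List.sum_nil] at this
      push_cast
      omega
    | cons g d' =>
      simp only [pvBuild, List.length_append, PySem.List.pyRepeat_singleton,
        List.length_replicate, List.sum_cons]
      have hk0 : 0 ≤ k := hk k (by simp)
      have hg0 : 0 ≤ g := hd g (by simp)
      have hl' : d'.length < ks.length ∨ d' = [] := by
        rcases hl with hl | hl
        · left; simpa using hl
        · simp at hl
      have := ih d' (fun a ha => hk a (by simp [ha])) (fun a ha => hd a (by simp [ha])) hl'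
      push_cast
      omega

theorem pvS1_render (c : Char) (hc1 : c ≠ 'P') (hc2 : c ≠ '|') :
    ∀ (ks d : List Int) (pre : List Char), ks.length = d.length + 1 →
      '|' ∉ pre → 'P' ∉ pre →
      pvS1 (pre ++ renderP d) (ks.map pvFrag) c = pre ++ pvBuild c ks d := by
  intro ks
  induction ks with
  | nil =>
    intro d pre hlen hpre1 hpre2
    simp at hlen
  | cons k ks ih =>
    intro d pre hlen hpre1 hpre2
    have hstep : ∀ (x : List Char) (r : List Char) (rs : List (List Char)),
        pvS1 x (r :: rs) c = pvS1 (pvReplaceP (pvReplaceFirstBar x r) c) rs c := by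
      intro x r rs
      simp [pvS1, List.foldl_cons]
    have hmapid : ∀ (l : List Char), 'P' ∉ l →
        l.map (fun a => if a = 'P' then c else a) = l := by
      intro l hl
      rw [List.map_congr_left (fun a ha => if_neg (fun h => hl (by rw [← h]; exact ha)))]
      simp
    cases d with
    | nil =>
      have hks : ks = [] := by
        simpa using hlen
      subst hks
      rw [List.map_cons, List.map_nil, hstep]
      have h1 : pre ++ renderP [] = pre ++ '|' :: [] := rfl
      rw [h1, pvReplaceFirstBar_append pre [] (pvFrag k) hpre1]
      rw [pvReplaceP_eq_map]
      rw [show pvFrag k = List.replicate k.toNat 'P' from by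
        unfold pvFrag; rw [PySem.List.pyRepeat_singleton]]
      simp only [List.append_nil, List.map_append, List.map_replicate, reduceIte]
      rw [hmapid pre hpre2]
      simp [pvS1, pvBuild, PySem.List.pyRepeat_singleton]
    | cons g d' =>
      have hlen' : ks.length = d'.length + 1 := by simpa using hlen
      rw [List.map_cons, hstep]
      have h1 : pre ++ renderP (g :: d') =
          pre ++ '|' :: (List.replicate g.toNat '.' ++ renderP d') := by
        rw [renderP_cons]
      rw [h1, pvReplaceFirstBar_append pre _ (pvFrag k) hpre1]
      rw [pvReplaceP_eq_map]
      rw [show pvFrag k = List.replicate k.toNat 'P' from by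
        unfold pvFrag; rw [PySem.List.pyRepeat_singleton]]
      simp only [List.map_append, List.map_replicate, reduceIte]
      rw [if_neg (show ¬('.' : Char) = 'P' by decide)]
      rw [hmapid pre hpre2]
      have h3 : (renderP d').map (fun a => if a = 'P' then c else a) = renderP d' := by
        refine hmapid _ ?_
        intro hP
        rcases renderP_chars d' 'P' hP with h | h <;> simp at h
      rw [h3]
      have h4 : pre ++ (List.replicate k.toNat c ++ (List.replicate g.toNat '.' ++ renderP d')) =
          (pre ++ List.replicate k.toNat c ++ List.replicate g.toNat '.') ++ renderP d' := by
        simp [List.append_assoc]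
      rw [h4]
      rw [ih d' _ hlen' ?_ ?_]
      · simp [pvBuild, PySem.List.pyRepeat_singleton, List.append_assoc]
      · intro hmem
        rcases List.mem_append.mp hmem with hmem | hmem
        · rcases List.mem_append.mp hmem with hmem | hmem
          · exact hpre1 hmem
          · exact hc2 (List.eq_of_mem_replicate hmem).symm
        · have := List.eq_of_mem_replicate hmem
          simp at this
      · intro hmem
        rcases List.mem_append.mp hmem with hmem | hmem
        · rcases List.mem_append.mp hmem with hmem | hmem
          · exact hpre2 hmem
          · exact hc1 (List.eq_of_mem_replicate hmem).symm
        · have := List.eq_of_mem_replicate hmem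
          simp at this

-- ---------- stage characterizations ----------

theorem mem_pvInner (ms n : Int) (frags : List (List Char)) (allp : PySem.Set (List String))
    (o1 o2 : List Char) (x : List String) :
    x ∈ pvInner ms n frags allp o1 o2 ↔ x ∈ allp ∨
      (¬ (PySem.List.len (o1 ++ o2) - 2 * n > ms) ∧
       ∃ rs, rs ∈ pvProdRep frags n.toNat ∧
         ¬ (PySem.List.len (pvS1 o1 rs '(' ++ pvS1 o2 rs ')') > ms) ∧
         x = [String.ofList (pvS1 o1 rs '('),
              String.ofList ((PySem.List.slice? (pvS1 o2 rs ')') none none (-1)).getD [])]) := by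
  unfold pvInner
  split_ifs with hg
  · constructor
    · exact fun h => Or.inl h
    · rintro (h | ⟨hng, _⟩)
      · exact h
      · exact absurd hg hng
  · rw [foldl_mem_iff _
      (fun rs x => ¬ (PySem.List.len (pvS1 o1 rs '(' ++ pvS1 o2 rs ')') > ms) ∧
        x = [String.ofList (pvS1 o1 rs '('),
             String.ofList ((PySem.List.slice? (pvS1 o2 rs ')') none none (-1)).getD [])])
      ?_ _ allp x]
    · constructor
      · rintro (h | h)
        · exact Or.inl h
        · exact Or.inr ⟨hg, h⟩
      · rintro (h | ⟨_, h⟩)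
        · exact Or.inl h
        · exact Or.inr h
    · intro acc rs y
      dsimp only
      split_ifs with h2
      · constructor
        · exact fun h => Or.inl h
        · rintro (h | ⟨hn2, _⟩)
          · exact h
          · exact absurd h2 hn2
      · rw [PySem.Set.mem_add]
        tauto

theorem mem_pvStage (ms m : Int) (frags : List (List Char)) (allp : PySem.Set (List String))
    (n : Int) (x : List String) :
    x ∈ pvStage ms m frags allp n ↔ x ∈ allp ∨ PA ms m frags n x := by
  have heq : pvStage ms m frags allp n =
      (outA ms m n).foldl (fun allp o1 =>
        (outA ms m n).foldl (fun allp o2 => pvInner ms n frags allp o1 o2) allp) allp := rfl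
  rw [heq]
  rw [foldl_mem_iff _
    (fun o1 x => ∃ o2, o2 ∈ outA ms m n ∧
      (¬ (PySem.List.len (o1 ++ o2) - 2 * n > ms) ∧
       ∃ rs, rs ∈ pvProdRep frags n.toNat ∧
         ¬ (PySem.List.len (pvS1 o1 rs '(' ++ pvS1 o2 rs ')') > ms) ∧
         x = [String.ofList (pvS1 o1 rs '('),
              String.ofList ((PySem.List.slice? (pvS1 o2 rs ')') none none (-1)).getD [])]))
    ?_ _ allp x]
  · unfold PA
    rfl
  · intro acc o1 y
    rw [foldl_mem_iff _ (fun o2 y =>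
      (¬ (PySem.List.len (o1 ++ o2) - 2 * n > ms) ∧
       ∃ rs, rs ∈ pvProdRep frags n.toNat ∧
         ¬ (PySem.List.len (pvS1 o1 rs '(' ++ pvS1 o2 rs ')') > ms) ∧
         y = [String.ofList (pvS1 o1 rs '('),
              String.ofList ((PySem.List.slice? (pvS1 o2 rs ')') none none (-1)).getD [])]))
      ?_ _ acc y]
    intro acc2 o2 z
    exact mem_pvInner ms n frags acc2 o1 o2 z

theorem mem_pvStageB (ms m : Int) (allp : PySem.Set (List String)) (n : Int) (x : List String) :
    x ∈ pvStageB ms m allp n ↔ x ∈ allp ∨ PB ms m n x := by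
  have heq : pvStageB ms m allp n =
      (pvProdRep (PySem.List.pyRange m (2 * m) 1) n.toNat).foldl (fun allp ks =>
        (pvComps (max (n - 1) 0).toNat (ms - n * m)).foldl (fun allp d1 =>
          if 2 * ks.sum + d1.sum > ms then allp
          else
            (pvComps (max (n - 1) 0).toNat (ms - n * m)).foldl (fun allp d2 =>
              if 2 * ks.sum + d1.sum + d2.sum > ms then allp
              else PySem.Set.add allp
                [String.ofList (pvBuild '(' ks d1),
                 String.ofList ((PySem.List.slice? (pvBuild ')' ks d2) none none (-1)).getD [])]) allp) allp) allp := rfl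
  rw [heq]
  rw [foldl_mem_iff _
    (fun ks x => ∃ d1, d1 ∈ pvComps (max (n - 1) 0).toNat (ms - n * m) ∧
      (¬ (2 * ks.sum + d1.sum > ms) ∧
       ∃ d2, d2 ∈ pvComps (max (n - 1) 0).toNat (ms - n * m) ∧
         (¬ (2 * ks.sum + d1.sum + d2.sum > ms) ∧
          x = [String.ofList (pvBuild '(' ks d1),
               String.ofList ((PySem.List.slice? (pvBuild ')' ks d2) none none (-1)).getD [])])))
    ?_ _ allp x]
  · unfold PB
    rfl
  · intro acc ks y
    rw [foldl_mem_iff _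
      (fun d1 y => ¬ (2 * ks.sum + d1.sum > ms) ∧
        ∃ d2, d2 ∈ pvComps (max (n - 1) 0).toNat (ms - n * m) ∧
          (¬ (2 * ks.sum + d1.sum + d2.sum > ms) ∧
           y = [String.ofList (pvBuild '(' ks d1),
                String.ofList ((PySem.List.slice? (pvBuild ')' ks d2) none none (-1)).getD [])]))
      ?_ _ acc y]
    intro acc2 d1 z
    split_ifs with hg
    · constructor
      · exact fun h => Or.inl h
      · rintro (h | ⟨hn2, _⟩)
        · exact h
        · exact absurd hg hn2
    · rw [foldl_mem_iff _
        (fun d2 z => ¬ (2 * ks.sum + d1.sum + d2.sum > ms) ∧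
          z = [String.ofList (pvBuild '(' ks d1),
               String.ofList ((PySem.List.slice? (pvBuild ')' ks d2) none none (-1)).getD [])])
        ?_ _ acc2 z]
      · constructor
        · rintro (h | h)
          · exact Or.inl h
          · exact Or.inr ⟨hg, h⟩
        · rintro (h | ⟨_, h⟩)
          · exact Or.inl h
          · exact Or.inr h
      · intro acc3 d2 w
        split_ifs with h2
        · constructor
          · exact fun h => Or.inl h
          · rintro (h | ⟨hn2, _⟩)
            · exact h
            · exact absurd h2 hn2
        · rw [PySem.Set.mem_add]
          tauto

theorem nodup_pvStage (ms m : Int) (frags : List (List Char)) (allp : PySem.Set (List String))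
    (n : Int) (h : allp.Nodup) : (pvStage ms m frags allp n).Nodup := by
  have heq : pvStage ms m frags allp n =
      (outA ms m n).foldl (fun allp o1 =>
        (outA ms m n).foldl (fun allp o2 => pvInner ms n frags allp o1 o2) allp) allp := rfl
  rw [heq]
  refine foldl_nodup_pres _ ?_ _ _ h
  intro acc o1 ha
  refine foldl_nodup_pres _ ?_ _ _ ha
  intro acc2 o2 ha2
  unfold pvInner
  split_ifs with hg
  · exact ha2
  · refine foldl_nodup_pres _ ?_ _ _ ha2
    intro acc3 rs ha3
    dsimp only
    split_ifs with h2
    · exact ha3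
    · exact PySem.Set.nodup_add _ _ ha3

theorem nodup_pvStageB (ms m : Int) (allp : PySem.Set (List String)) (n : Int)
    (h : allp.Nodup) : (pvStageB ms m allp n).Nodup := by
  have heq : pvStageB ms m allp n =
      (pvProdRep (PySem.List.pyRange m (2 * m) 1) n.toNat).foldl (fun allp ks =>
        (pvComps (max (n - 1) 0).toNat (ms - n * m)).foldl (fun allp d1 =>
          if 2 * ks.sum + d1.sum > ms then allp
          else
            (pvComps (max (n - 1) 0).toNat (ms - n * m)).foldl (fun allp d2 =>
              if 2 * ks.sum + d1.sum + d2.sum > ms then allp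
              else PySem.Set.add allp
                [String.ofList (pvBuild '(' ks d1),
                 String.ofList ((PySem.List.slice? (pvBuild ')' ks d2) none none (-1)).getD [])]) allp) allp) allp := rfl
  rw [heq]
  refine foldl_nodup_pres _ ?_ _ _ h
  intro acc ks ha
  refine foldl_nodup_pres _ ?_ _ _ ha
  intro acc2 d1 ha2
  split_ifs with hg
  · exact ha2
  · refine foldl_nodup_pres _ ?_ _ _ ha2
    intro acc3 d2 ha3
    split_ifs with h2
    · exact ha3
    · exact PySem.Set.nodup_add _ _ ha3

-- ---------- the out set of stage n ----------

theorem mem_outA (ms m n : Int) (hn : 0 ≤ n) (x : List Char) :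
    x ∈ outA ms m n ↔ ReachR n (ms - n * m) (List.replicate n.toNat '|') x := by
  have hbase : PySem.List.pyRepeat ['|'] n = List.replicate n.toNat '|' :=
    PySem.List.pyRepeat_singleton '|' n
  have hlenb : PySem.List.len (PySem.List.pyRepeat ['|'] n) = n := by
    rw [hbase, PySem.List.len_eq, List.length_replicate]
    omega
  have heq : outA ms m n = pvGrow (PySem.List.len (PySem.List.pyRepeat ['|'] n))
      (ms - PySem.List.len (PySem.List.pyRepeat ['|'] n) * m)
      ((PySem.List.pyRepeat ['|'] n).length + (ms - PySem.List.len (PySem.List.pyRepeat ['|'] n) * m).toNat)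
      (pvMeasure ((PySem.List.pyRepeat ['|'] n).length + (ms - PySem.List.len (PySem.List.pyRepeat ['|'] n) * m).toNat)
        [PySem.List.pyRepeat ['|'] n])
      (PySem.Set.ofList [PySem.List.pyRepeat ['|'] n])
      (PySem.Set.ofList [PySem.List.pyRepeat ['|'] n]) := rfl
  rw [heq, hlenb, hbase]
  have hofl : PySem.Set.ofList [List.replicate n.toNat '|'] = [List.replicate n.toNat '|'] :=
    PySem.Set.ofList_eq_self_of_nodup _ (by simp)
  rw [hofl]
  set L := (List.replicate n.toNat '|').length + (ms - n * m).toNat with hL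
  have hcap : n + (ms - n * m) ≤ (L : Int) := by
    rw [hL]
    simp only [List.length_replicate]
    omega
  rw [pvGrow_mem n (ms - n * m) L hcap (pvMeasure L [List.replicate n.toNat '|'])
    [List.replicate n.toNat '|'] [List.replicate n.toNat '|'] (le_refl _)
    (fun s hs => hs) x]
  constructor
  · rintro (h | ⟨s, hs, hr⟩)
    · rw [List.mem_singleton] at h
      rw [h]
      exact Relation.ReflTransGen.refl
    · rw [List.mem_singleton] at hs
      rw [← hs]
      exact hr
  · intro h
    exact Or.inr ⟨List.replicate n.toNat '|', by simp, h⟩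


-- ---------- the per-stage equivalence ----------

theorem stage_iff (ms m : Int) (hm : m ≠ 0) (n : Int)
    (hn : 0 ≤ n) (hnN : n < PySem.Int.floordiv (PySem.Int.floordiv ms 2) m + 1) (x : List String) :
    PA ms m ((PySem.List.pyRange m (2 * m) 1).map pvFrag) n x ↔ PB ms m n x := by
  by_cases hn0 : n = 0
  · subst hn0
    have hrepl : List.replicate (0 : Int).toNat '|' = ([] : List Char) := rfl
    constructor
    · rintro ⟨o1, ho1, o2, ho2, hg1, rs, hrs, hg2, rfl⟩
      rw [mem_outA ms m 0 le_rfl, hrepl, reach_nil] at ho1 ho2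
      subst ho1; subst ho2
      obtain ⟨hrsl, -⟩ := (mem_pvProdRep _ _ rs).mp hrs
      have hrsnil : rs = [] := List.eq_nil_of_length_eq_zero hrsl
      subst hrsnil
      have hms : 0 ≤ ms := by
        simp [PySem.List.len_eq] at hg1
        omega
      refine ⟨[], (mem_pvProdRep _ _ _).mpr ⟨rfl, by simp⟩,
        [], (mem_pvComps _ _ _).mpr ⟨rfl, by simp, by simp; omega⟩, by simp; omega,
        [], (mem_pvComps _ _ _).mpr ⟨rfl, by simp, by simp; omega⟩, by simp; omega, rfl⟩
    · rintro ⟨ks, hks, d1, hd1, hgm, d2, hd2, hgf, rfl⟩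
      obtain ⟨hksl, -⟩ := (mem_pvProdRep _ _ ks).mp hks
      have hksnil : ks = [] := List.eq_nil_of_length_eq_zero hksl
      subst hksnil
      obtain ⟨hd1l, -, hd1s⟩ := (mem_pvComps _ _ d1).mp hd1
      obtain ⟨hd2l, -, -⟩ := (mem_pvComps _ _ d2).mp hd2
      have h1 : d1 = [] := List.eq_nil_of_length_eq_zero (by simpa using hd1l)
      have h2 : d2 = [] := List.eq_nil_of_length_eq_zero (by simpa using hd2l)
      subst h1; subst h2
      have hms : 0 ≤ ms := by simp at hd1s; omega
      refine ⟨[], ?_, [], ?_, by simp [PySem.List.len_eq]; omega,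
        [], (mem_pvProdRep _ _ _).mpr ⟨rfl, by simp⟩, by simp [PySem.List.len_eq]; omega, rfl⟩
      · rw [mem_outA ms m 0 le_rfl, hrepl, reach_nil]
      · rw [mem_outA ms m 0 le_rfl, hrepl, reach_nil]
  · have hn1 : 1 ≤ n := by omega
    have hntpos : 1 ≤ n.toNat := by omega
    by_cases hmpos : 1 ≤ m
    · -- main case: m ≥ 1
      have hU : 0 ≤ ms - n * m := by
        have hle : n ≤ PySem.Int.floordiv (PySem.Int.floordiv ms 2) m := by omega
        have h1 : n * m ≤ PySem.Int.floordiv ms 2 :=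
          (PySem.Int.le_floordiv_iff_mul_le (by omega)).mp hle
        have h2 : 0 ≤ n * m := mul_nonneg hn (by omega)
        have h3 : 0 ≤ PySem.Int.floordiv ms 2 := le_trans h2 h1
        have h4 : 0 ≤ ms := by
          have := (PySem.Int.le_floordiv_iff_mul_le (a := ms) (b := 2) (by omega)).mp h3
          omega
        have h5 : PySem.Int.floordiv ms 2 ≤ ms := by
          rw [PySem.Int.floordiv_eq_ediv_of_pos (by omega)]
          omega
        linarith
      have hcast : ((n.toNat : Int)) = n := Int.toNat_of_nonneg hn
      have hsucc : n.toNat = (n.toNat - 1) + 1 := by omega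
      have hreach : ∀ y, ReachR n (ms - n * m) (List.replicate n.toNat '|') y ↔
          GoodS n.toNat (ms - n * m) y := by
        intro y
        have h := reach_iff_good n.toNat (ms - n * m) hU y
        rwa [hcast] at h
      have hgap : (max (n - 1) 0).toNat = n.toNat - 1 := by omega
      constructor
      · rintro ⟨o1, ho1, o2, ho2, hg1, rs, hrs, hg2, rfl⟩
        rw [mem_outA ms m n hn, hreach, hsucc, good_iff_render] at ho1 ho2
        obtain ⟨d1, hd1l, hd1n, hd1s, rfl⟩ := ho1
        obtain ⟨d2, hd2l, hd2n, hd2s, rfl⟩ := ho2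
        rw [pvProdRep_map] at hrs
        obtain ⟨ks, hks, rfl⟩ := List.mem_map.mp hrs
        obtain ⟨hksl, hksm⟩ := (mem_pvProdRep _ _ ks).mp hks
        have hknn : ∀ k ∈ ks, 0 ≤ k := by
          intro k hk
          have := (PySem.List.mem_pyRange_one).mp (hksm k hk)
          omega
        have hs1 : pvS1 (renderP d1) (ks.map pvFrag) '(' = pvBuild '(' ks d1 := by
          have h := pvS1_render '(' (by decide) (by decide) ks d1 [] (by omega) (by simp) (by simp)
          simpa using h
        have hs2 : pvS1 (renderP d2) (ks.map pvFrag) ')' = pvBuild ')' ks d2 := by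
          have h := pvS1_render ')' (by decide) (by decide) ks d2 [] (by omega) (by simp) (by simp)
          simpa using h
        have hlb1 : ((pvBuild '(' ks d1).length : Int) = ks.sum + d1.sum :=
          length_pvBuild '(' ks d1 hknn hd1n (Or.inl (by omega))
        have hlb2 : ((pvBuild ')' ks d2).length : Int) = ks.sum + d2.sum :=
          length_pvBuild ')' ks d2 hknn hd2n (Or.inl (by omega))
        have hg2' : 2 * ks.sum + d1.sum + d2.sum ≤ ms := by
          rw [hs1, hs2] at hg2
          simp only [PySem.List.len_eq, List.length_append, not_lt] at hg2
          push_cast at hg2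
          omega
        have hd2snn : 0 ≤ d2.sum := List.sum_nonneg hd2n
        have hd1snn : 0 ≤ d1.sum := List.sum_nonneg hd1n
        refine ⟨ks, hks, d1, (mem_pvComps _ _ _).mpr ⟨by omega, hd1n, hd1s⟩, by omega,
          d2, (mem_pvComps _ _ _).mpr ⟨by omega, hd2n, hd2s⟩, by omega, ?_⟩
        rw [hs1, hs2]
      · rintro ⟨ks, hks, d1, hd1, hgm, d2, hd2, hgf, rfl⟩
        obtain ⟨hksl, hksm⟩ := (mem_pvProdRep _ _ ks).mp hks
        obtain ⟨hd1l, hd1n, hd1s⟩ := (mem_pvComps _ _ d1).mp hd1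
        obtain ⟨hd2l, hd2n, hd2s⟩ := (mem_pvComps _ _ d2).mp hd2
        have hknn : ∀ k ∈ ks, 0 ≤ k := by
          intro k hk
          have := (PySem.List.mem_pyRange_one).mp (hksm k hk)
          omega
        have hkm : ∀ k ∈ ks, m ≤ k := by
          intro k hk
          have := (PySem.List.mem_pyRange_one).mp (hksm k hk)
          omega
        have hksnn : 0 ≤ ks.sum := List.sum_nonneg hknn
        have hd1snn : 0 ≤ d1.sum := List.sum_nonneg hd1n
        have hd2snn : 0 ≤ d2.sum := List.sum_nonneg hd2n
        have hs1 : pvS1 (renderP d1) (ks.map pvFrag) '(' = pvBuild '(' ks d1 := by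
          have h := pvS1_render '(' (by decide) (by decide) ks d1 [] (by omega) (by simp) (by simp)
          simpa using h
        have hs2 : pvS1 (renderP d2) (ks.map pvFrag) ')' = pvBuild ')' ks d2 := by
          have h := pvS1_render ')' (by decide) (by decide) ks d2 [] (by omega) (by simp) (by simp)
          simpa using h
        have hlr1 : ((renderP d1).length : Int) = (d1.length : Int) + 1 + d1.sum :=
          length_renderP d1 hd1n
        have hlr2 : ((renderP d2).length : Int) = (d2.length : Int) + 1 + d2.sum :=
          length_renderP d2 hd2n
        have hlb1 : ((pvBuild '(' ks d1).length : Int) = ks.sum + d1.sum :=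
          length_pvBuild '(' ks d1 hknn hd1n (Or.inl (by omega))
        have hlb2 : ((pvBuild ')' ks d2).length : Int) = ks.sum + d2.sum :=
          length_pvBuild ')' ks d2 hknn hd2n (Or.inl (by omega))
        refine ⟨renderP d1, ?_, renderP d2, ?_, ?_, ks.map pvFrag, ?_, ?_, ?_⟩
        · rw [mem_outA ms m n hn, hreach, hsucc, good_iff_render]
          exact ⟨d1, by omega, hd1n, hd1s, rfl⟩
        · rw [mem_outA ms m n hn, hreach, hsucc, good_iff_render]
          exact ⟨d2, by omega, hd2n, hd2s, rfl⟩
        · simp only [PySem.List.len_eq, List.length_append, not_lt]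
          push_cast
          omega
        · rw [pvProdRep_map]
          exact List.mem_map.mpr ⟨ks, hks, rfl⟩
        · rw [hs1, hs2]
          simp only [PySem.List.len_eq, List.length_append, not_lt]
          push_cast
          omega
        · rw [hs1, hs2]
    · -- m ≤ -1 : both stages are empty for n ≥ 1
      have hml : m ≤ -1 := by omega
      have hrange : PySem.List.pyRange m (2 * m) 1 = [] :=
        PySem.List.pyRange_one_eq_nil (by omega)
      have hprod : ∀ k : Nat, 1 ≤ k → pvProdRep (PySem.List.pyRange m (2 * m) 1) k = [] := by
        intro k hk
        obtain ⟨k', rfl⟩ : ∃ k', k = k' + 1 := ⟨k - 1, by omega⟩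
        rw [hrange]
        simp [pvProdRep]
      constructor
      · rintro ⟨o1, ho1, o2, ho2, hg1, rs, hrs, hg2, rfl⟩
        rw [show ((PySem.List.pyRange m (2 * m) 1).map pvFrag) = [] by rw [hrange]; rfl] at hrs
        have : pvProdRep ([] : List (List Char)) n.toNat = [] := by
          obtain ⟨k', hk'⟩ : ∃ k', n.toNat = k' + 1 := ⟨n.toNat - 1, by omega⟩
          rw [hk']
          simp [pvProdRep]
        rw [this] at hrs
        simp at hrs
      · rintro ⟨ks, hks, _⟩
        rw [hprod n.toNat (by omega)] at hks
        simp at hks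

theorem sorted_id_eq_iff_perm (xs ys : List (List String)) :
    (PySem.List.sorted xs (fun x => x) false = PySem.List.sorted ys (fun x => x) false) ↔
      xs.Perm ys := by
  have e : ∀ zs : List (List String),
      PySem.List.sorted zs (fun x => x) false =
        @PySem.List.sorted (List String) (List String) List.instLinearOrder.toLT
          LinearOrder.toDecidableLT zs (fun x => x) false := by
    intro zs
    exact congrArg
      (fun inst => @PySem.List.sorted (List String) (List String) List.instLinearOrder.toLT
        inst zs (fun x => x) false)
      (Subsingleton.elim _ _)
  rw [e xs, e ys]
  exact PySem.List.sorted_id_eq_sorted_id_iff_perm xs ys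

theorem stem_structures_key (ms m : Int) (hm : m ≠ 0) :
    stem_structures ms m = stem_structures_alt ms m := by
  have hA : stem_structures ms m = PySem.List.sorted
      ((PySem.List.pyRange 0 (PySem.Int.floordiv (PySem.Int.floordiv ms 2) m + 1) 1).foldl
        (pvStage ms m ((PySem.List.pyRange m (2 * m) 1).map pvFrag)) PySem.Set.empty)
      (fun x => x) false := rfl
  have hB : stem_structures_alt ms m = PySem.List.sorted
      ((PySem.List.pyRange 0 (PySem.Int.floordiv (PySem.Int.floordiv ms 2) m + 1) 1).foldl
        (pvStageB ms m) PySem.Set.empty)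
      (fun x => x) false := rfl
  rw [hA, hB, sorted_id_eq_iff_perm]
  have hemp : (PySem.Set.empty : PySem.Set (List String)) = [] := rfl
  have hndA : ((PySem.List.pyRange 0 (PySem.Int.floordiv (PySem.Int.floordiv ms 2) m + 1) 1).foldl
      (pvStage ms m ((PySem.List.pyRange m (2 * m) 1).map pvFrag)) PySem.Set.empty).Nodup :=
    foldl_nodup_pres _ (fun acc y ha => nodup_pvStage ms m _ acc y ha) _ _
      (by rw [hemp]; exact List.nodup_nil)
  have hndB : ((PySem.List.pyRange 0 (PySem.Int.floordiv (PySem.Int.floordiv ms 2) m + 1) 1).foldl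
      (pvStageB ms m) PySem.Set.empty).Nodup :=
    foldl_nodup_pres _ (fun acc y ha => nodup_pvStageB ms m acc y ha) _ _
      (by rw [hemp]; exact List.nodup_nil)
  rw [List.perm_ext_iff_of_nodup hndA hndB]
  intro x
  rw [foldl_mem_iff _ (PA ms m ((PySem.List.pyRange m (2 * m) 1).map pvFrag))
    (fun acc y x => mem_pvStage ms m _ acc y x)]
  rw [foldl_mem_iff _ (PB ms m) (fun acc y x => mem_pvStageB ms m acc y x)]
  rw [hemp]
  simp only [List.not_mem_nil, false_or]
  constructor
  · rintro ⟨nn, hnn, h⟩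
    obtain ⟨h1, h2⟩ := PySem.List.mem_pyRange_one.mp hnn
    exact ⟨nn, hnn, (stage_iff ms m hm nn h1 h2 x).mp h⟩
  · rintro ⟨nn, hnn, h⟩
    obtain ⟨h1, h2⟩ := PySem.List.mem_pyRange_one.mp hnn
    exact ⟨nn, hnn, (stage_iff ms m hm nn h1 h2 x).mpr h⟩

-- ===== VERDICT (by name: the statement is the Claim_ definition above) =====
theorem stem_structures_spec : Claim_equal_stem_structures := by
  intro ms m _ hm
  unfold Spec_stem_structures
  exact stem_structures_key ms m hm
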